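-- pv_equiv track=rewrite | github.com/lisj1211/Algorithm | middle/ObtuseTriangleNum.py | obtuse_triangle_num
-- ===== SOURCE A (Python) =====
-- from typing import List
--
-- def obtuse_triangle_num(points: List) -> int:
--     """
--     固定一个端点A，剩余两个端点在A+180度范围内任意选择，因为圆的直径与圆上任意一点都是直角三角形，
--     遍历points列表，每个点都当作A端点，找到此时钝角三角形的数量，求和则为最终结果
--     """
--     points.sort()
--     # 加36000为了方便计算以18000为A端点时的情况，添加数组避免其他处理
--     enlarge = points + [p + 36000 for p in points]
--     ans = 0
--     left = 0
--     for idx, degree in enumerate(points):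
--         while enlarge[left] < degree + 18000:
--             left += 1
--         degree_num = left - idx - 1
--         # 至少得有2个点才能组成三角形
--         ans += 0 if degree_num < 2 else degree_num * (degree_num - 1) // 2
--
--     return ans
-- ===== SOURCE B (Python) =====
-- import bisect
-- from typing import List
--
--
-- def obtuse_triangle_num(points: List) -> int:
--     # Same anchor counting, but with no enlarged doubled array and no element-by-element
--     # scan: the boundary pointer jumps directly to its next position with binary searches
--     # (bisect_left) on the sorted points themselves, folding the +36000 wrap-around into
--     # a search for degree - 18000 in the second lap.
--     points.sort()
--     n = len(points)
--     ans = 0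
--     left = 0
--     for idx, degree in enumerate(points):
--         if left < n:
--             b1 = bisect.bisect_left(points, degree + 18000)
--             if b1 < n:
--                 left = max(left, b1)
--             else:
--                 left = n + bisect.bisect_left(points, degree - 18000)
--         else:
--             left = n + max(left - n, bisect.bisect_left(points, degree - 18000))
--         degree_num = left - idx - 1
--         if degree_num >= 2:
--             ans += degree_num * (degree_num - 1) // 2
--     return ans
-- ===== Notes on version B (the rewrite author's own statement) =====
-- stated objective: alternative
-- what changed: B drops the doubled `enlarge` array and A's element-by-element while-scan entirely: the boundary pointer jumps to its next stop in O(log n) with bisect_left binary searches on the sorted points themselves (searching degree + 18000 on the first lap and degree - 18000 for the +36000 wrap-around lap), combined with the carried monotone lower bound by max().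
import Mathlib
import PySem

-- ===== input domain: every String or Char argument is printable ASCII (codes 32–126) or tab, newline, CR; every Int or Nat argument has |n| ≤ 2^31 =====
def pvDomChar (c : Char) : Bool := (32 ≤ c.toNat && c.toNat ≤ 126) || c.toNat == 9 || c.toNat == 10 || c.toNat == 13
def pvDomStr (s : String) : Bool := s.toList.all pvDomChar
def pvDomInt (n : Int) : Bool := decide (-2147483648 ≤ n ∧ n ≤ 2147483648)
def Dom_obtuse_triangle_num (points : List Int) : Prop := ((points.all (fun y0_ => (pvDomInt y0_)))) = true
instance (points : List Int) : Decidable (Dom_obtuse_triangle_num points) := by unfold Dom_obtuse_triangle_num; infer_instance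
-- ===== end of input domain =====

-- B drops A's doubled `enlarge` array and element-by-element pointer scan: the boundary pointer
-- jumps to its next stop with bisect_left binary searches on the sorted points themselves
-- (alternative decomposition, same overall cost). Both Pythons sort `points` in place; the
-- equivalence proved here is about the return value only.

-- ===== PORT A =====
-- while enlarge[left] < degree + 18000: left += 1
-- (enlarge[left] is IndexError out of range; for A's caller `left` never leaves the array, so the
-- `none` branch below is unreachable there — exact elsewhere)
def pyAdvance (enlarge : List Int) (thr : Int) (left : Nat) : Nat :=
  match h : PySem.List.pyGet? enlarge (left : Int) with
  | some v => if v < thr then pyAdvance enlarge thr (left + 1) else left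
  | none => left
termination_by enlarge.length - left
decreasing_by
  rw [PySem.List.pyGet?_natCast] at h
  obtain ⟨hl, -⟩ := List.getElem?_eq_some_iff.mp h
  omega

def loopA (enlarge : List Int) : List (Int × Int) → Nat → Int → Int
  | [], _, ans => ans
  | (idx, degree) :: rest, left, ans =>
      let left' := pyAdvance enlarge (degree + 18000) left
      let dn : Int := (left' : Int) - idx - 1
      loopA enlarge rest left' (ans + if dn < 2 then 0 else PySem.Int.floordiv (dn * (dn - 1)) 2)

def obtuse_triangle_num (points : List Int) : Int :=
  let pts := PySem.List.sorted points (fun p => p) false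
  let enlarge := pts ++ pts.map (fun p => p + 36000)
  loopA enlarge (PySem.List.enumerate pts 0) 0 0

-- ===== PORT B =====
-- Source B's per-anchor pointer jump (the if/else computing `left` in the loop body)
def jumpB (pts : List Int) (n : Nat) (degree : Int) (left : Nat) : Nat :=
  if left < n then
    (if PySem.List.bisectLeft pts (degree + 18000) < n then
      max left (PySem.List.bisectLeft pts (degree + 18000))
    else n + PySem.List.bisectLeft pts (degree - 18000))
  else n + max (left - n) (PySem.List.bisectLeft pts (degree - 18000))

def loopB (pts : List Int) (n : Nat) : List (Int × Int) → Nat → Int → Int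
  | [], _, ans => ans
  | (idx, degree) :: rest, left, ans =>
      let left' := jumpB pts n degree left
      let dn : Int := (left' : Int) - idx - 1
      loopB pts n rest left' (if 2 ≤ dn then ans + PySem.Int.floordiv (dn * (dn - 1)) 2 else ans)

def obtuse_triangle_num_alt (points : List Int) : Int :=
  let pts := PySem.List.sorted points (fun p => p) false
  loopB pts pts.length (PySem.List.enumerate pts 0) 0 0

-- ===== PRECONDITION & SPEC =====
def Spec_obtuse_triangle_num (points : List Int) (out : Int) : Prop := out = obtuse_triangle_num_alt points
instance (points : List Int) (out : Int) : Decidable (Spec_obtuse_triangle_num points out) := by unfold Spec_obtuse_triangle_num; infer_instance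

-- ===== CLAIM (what is proved, stated in full; the proofs are below) =====
def Claim_equal_obtuse_triangle_num : Prop := ∀ (points : List Int), Dom_obtuse_triangle_num points → Spec_obtuse_triangle_num points (obtuse_triangle_num points)

-- ===== LEMMAS AND PROOFS =====

-- A's while-scan from L stops exactly at the least index j ≥ L whose element is ≥ thr.
theorem pyAdvance_eq_least (E : List Int) (thr : Int) (L j : Nat)
    (hj : j < E.length) (hthr : thr ≤ E[j]) (hLj : L ≤ j)
    (hmin : ∀ i (h : i < E.length), L ≤ i → i < j → E[i] < thr) :
    pyAdvance E thr L = j := by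
  suffices h : ∀ (d L : Nat), j - L ≤ d → L ≤ j →
      (∀ i (h : i < E.length), L ≤ i → i < j → E[i] < thr) → pyAdvance E thr L = j from
    h j L (by omega) hLj hmin
  intro d
  induction d with
  | zero =>
      intro L hd hLj2 hmin2
      have hLeq : L = j := by omega
      subst hLeq
      rw [pyAdvance]
      split
      · rename_i v hsome
        rw [PySem.List.pyGet?_natCast] at hsome
        obtain ⟨hl, hEl⟩ := List.getElem?_eq_some_iff.mp hsome
        rw [if_neg (by omega)]
      · rfl
  | succ d ihd =>
      intro L hd hLj2 hmin2
      rw [pyAdvance]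
      split
      · rename_i v hsome
        rw [PySem.List.pyGet?_natCast] at hsome
        obtain ⟨hl, hEl⟩ := List.getElem?_eq_some_iff.mp hsome
        by_cases hLeq : L = j
        · subst hLeq
          rw [if_neg (by omega)]
        · have hLlt : L < j := by omega
          have hEL : E[L] < thr := hmin2 L hl (le_refl _) hLlt
          rw [if_pos (by omega)]
          apply ihd
          · omega
          · omega
          · intro i hi h1 h2
            exact hmin2 i hi (by omega) h2
      · rename_i hnone
        rw [PySem.List.pyGet?_natCast] at hnone
        have := List.getElem?_eq_none_iff.mp hnone
        omega

theorem bisectLeft_le_of_witness (pts : List Int) (hs : pts.Pairwise (fun a b => a ≤ b))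
    (x : Int) (k : Nat) (hk : k < pts.length) (hwit : x ≤ pts[k]) :
    PySem.List.bisectLeft pts x ≤ k := by
  obtain ⟨hlen, hlt, hge⟩ := PySem.List.bisectLeft_spec pts x hs
  by_contra hgt
  have := hlt k hk (by omega)
  omega

theorem jumpB_le (pts : List Int) (hs : pts.Pairwise (fun a b => a ≤ b)) (degree : Int)
    (L k : Nat) (hk : k < pts.length) (hwit : degree - 18000 ≤ pts[k])
    (hL : L ≤ pts.length + k) : jumpB pts pts.length degree L ≤ pts.length + k := by
  have hb1 : PySem.List.bisectLeft pts (degree + 18000) ≤ pts.length :=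
    (PySem.List.bisectLeft_spec pts (degree + 18000) hs).1
  have hb2 : PySem.List.bisectLeft pts (degree - 18000) ≤ k :=
    bisectLeft_le_of_witness pts hs _ k hk hwit
  unfold jumpB
  split_ifs with h1 h2
  · exact le_trans (Nat.max_le.mpr ⟨by omega, by omega⟩) (by omega)
  · omega
  · exact le_trans (Nat.add_le_add_left (Nat.max_le.mpr ⟨by omega, hb2⟩) _) (by omega)

-- A's scan over the doubled array equals B's binary-search jump.
theorem advance_eq_jumpB (pts : List Int) (hs : pts.Pairwise (fun a b => a ≤ b)) (degree : Int)
    (L k : Nat) (hk : k < pts.length) (hwit : degree - 18000 ≤ pts[k])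
    (hL : L ≤ pts.length + k) :
    pyAdvance (pts ++ pts.map (fun p => p + 36000)) (degree + 18000) L =
      jumpB pts pts.length degree L := by
  obtain ⟨hb1len, hb1lt, hb1ge⟩ := PySem.List.bisectLeft_spec pts (degree + 18000) hs
  obtain ⟨hb2len, hb2lt, hb2ge⟩ := PySem.List.bisectLeft_spec pts (degree - 18000) hs
  have hb2k : PySem.List.bisectLeft pts (degree - 18000) ≤ k :=
    bisectLeft_le_of_witness pts hs _ k hk hwit
  unfold jumpB
  set n := pts.length with hn
  set b1 := PySem.List.bisectLeft pts (degree + 18000) with hb1def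
  set b2 := PySem.List.bisectLeft pts (degree - 18000) with hb2def
  have hElen : (pts ++ pts.map (fun p => p + 36000)).length = n + n := by
    simp [List.length_append, List.length_map, hn]
  have getE1 : ∀ (i : Nat) (h : i < n),
      (pts ++ pts.map (fun p => p + 36000))[i]'(by omega) = pts[i] := by
    intro i h
    rw [List.getElem_append_left h]
  have getE2 : ∀ (i : Nat) (h : i < n),
      (pts ++ pts.map (fun p => p + 36000))[n + i]'(by omega) = pts[i] + 36000 := by
    intro i h
    rw [List.getElem_append_right (by omega)]
    simp [hn]
  split_ifs with h1 h2
  · -- first lap, boundary inside the first lap: max L b1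
    have hjn : max L b1 < n := Nat.max_lt.mpr ⟨h1, h2⟩
    refine pyAdvance_eq_least _ _ _ _ (by omega) ?_ (Nat.le_max_left _ _) ?_
    · rw [getE1 _ hjn]
      exact hb1ge _ hjn (Nat.le_max_right _ _)
    · intro i hi hLi hij
      have hib : i < b1 := by
        rcases lt_max_iff.mp hij with h | h
        · omega
        · exact h
      have hin : i < n := by omega
      rw [getE1 i hin]
      exact hb1lt i hin hib
  · -- first lap exhausted: jump into the second lap at n + b2
    have hb2n : b2 < n := by omega
    refine pyAdvance_eq_least _ _ _ _ (by omega) ?_ (by omega) ?_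
    · rw [getE2 b2 hb2n]
      have := hb2ge b2 hb2n (le_refl _)
      omega
    · intro i hi hLi hij
      by_cases hin : i < n
      · rw [getE1 i hin]
        exact hb1lt i hin (by omega)
      · have hin' : i - n < n := by rw [hElen] at hi; omega
        have hEi : (pts ++ pts.map (fun p => p + 36000))[i]'(hi) = pts[i - n] + 36000 := by
          rw [List.getElem_append_right (by omega)]
          simp [hn]
        rw [hEi]
        have : pts[i - n] < degree - 18000 := hb2lt (i - n) hin' (by omega)
        omega
  · -- already in the second lap: n + max (L - n) b2
    have hLn : n ≤ L := by omega
    have hLnk : L - n ≤ k := by omega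
    have hmaxn : max (L - n) b2 < n := Nat.max_lt.mpr ⟨by omega, by omega⟩
    refine pyAdvance_eq_least _ _ _ _ (by omega) ?_ ?_ ?_
    · rw [getE2 _ hmaxn]
      have := hb2ge (max (L - n) b2) hmaxn (Nat.le_max_right _ _)
      omega
    · have : n + (L - n) = L := by omega
      calc L = n + (L - n) := by omega
        _ ≤ n + max (L - n) b2 := by exact Nat.add_le_add_left (Nat.le_max_left _ _) _
    · intro i hi hLi hij
      have hin : n ≤ i := by omega
      have hin' : i - n < n := by rw [hElen] at hi; omega
      have hEi : (pts ++ pts.map (fun p => p + 36000))[i]'(hi) = pts[i - n] + 36000 := by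
        rw [List.getElem_append_right (by omega)]
        simp [hn]
      rw [hEi]
      have hmax : i - n < max (L - n) b2 := by omega
      have hib : i - n < b2 := by
        rcases lt_max_iff.mp hmax with h | h
        · omega
        · exact h
      have := hb2lt (i - n) hin' hib
      omega

theorem enum_mem (xs : List Int) :
    ∀ (s : Int) (p : Int × Int), p ∈ PySem.List.enumerate xs s →
      ∃ k : Nat, ∃ h : k < xs.length, p = (s + k, xs[k]) := by
  induction xs with
  | nil => intro s p hp; rw [PySem.List.enumerate_nil] at hp; cases hp
  | cons x xs ih =>
      intro s p hp
      rw [PySem.List.enumerate_cons] at hp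
      rcases List.mem_cons.mp hp with h | h
      · exact ⟨0, by simp, by simp [h]⟩
      · obtain ⟨k, hk, hpk⟩ := ih (s + 1) p h
        refine ⟨k + 1, by simp [hk], ?_⟩
        rw [hpk, Prod.mk.injEq]
        refine ⟨by push_cast; ring, by simp⟩
  
theorem enum_pairwise_fst (xs : List Int) :
    ∀ s : Int, (PySem.List.enumerate xs s).Pairwise (fun a b => a.1 ≤ b.1) := by
  induction xs with
  | nil => intro s; rw [PySem.List.enumerate_nil]; exact List.Pairwise.nil
  | cons x xs ih =>
      intro s
      rw [PySem.List.enumerate_cons]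
      refine List.Pairwise.cons ?_ (ih (s + 1))
      intro q hq
      obtain ⟨k, hk, hqk⟩ := enum_mem xs (s + 1) q hq
      rw [hqk]
      show s ≤ s + 1 + (k : Int)
      have : (0 : Int) ≤ (k : Int) := Int.natCast_nonneg k
      omega

theorem loops_eq (pts : List Int) (hs : pts.Pairwise (fun a b => a ≤ b)) :
    ∀ (l : List (Int × Int)) (L : Nat) (ans : Int),
      (∀ p ∈ l, ∃ k : Nat, ∃ h : k < pts.length, p = ((k : Int), pts[k])) →
      l.Pairwise (fun a b => a.1 ≤ b.1) →
      (∀ p ∈ l, (L : Int) ≤ (pts.length : Int) + p.1) →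
      loopA (pts ++ pts.map (fun p => p + 36000)) l L ans = loopB pts pts.length l L ans := by
  intro l
  induction l with
  | nil => intro L ans _ _ _; rfl
  | cons hd rest ih =>
      intro L ans hmem hpw hbound
      obtain ⟨i, d⟩ := hd
      obtain ⟨k, hk, hpk⟩ := hmem (i, d) List.mem_cons_self
      rw [Prod.mk.injEq] at hpk
      obtain ⟨hik, hdk⟩ := hpk
      rw [List.pairwise_cons] at hpw
      obtain ⟨hhd, hrest⟩ := hpw
      have hLk : L ≤ pts.length + k := by
        have hb : (L : Int) ≤ (pts.length : Int) + i := hbound (i, d) List.mem_cons_self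
        rw [hik] at hb
        exact_mod_cast hb
      have hwit : d - 18000 ≤ pts[k] := by rw [hdk]; omega
      have hadv := advance_eq_jumpB pts hs d L k hk hwit hLk
      have hjle := jumpB_le pts hs d L k hk hwit hLk
      simp only [loopA, loopB]
      rw [hadv]
      have hacc : (ans + if ((jumpB pts pts.length d L : Int) - i - 1) < 2 then 0
              else PySem.Int.floordiv (((jumpB pts pts.length d L : Int) - i - 1) * (((jumpB pts pts.length d L : Int) - i - 1) - 1)) 2)
          = (if 2 ≤ ((jumpB pts pts.length d L : Int) - i - 1) then
              ans + PySem.Int.floordiv (((jumpB pts pts.length d L : Int) - i - 1) * (((jumpB pts pts.length d L : Int) - i - 1) - 1)) 2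
            else ans) := by
        split_ifs with ha hb
        · omega
        · omega
        · rfl
        · omega
      rw [hacc]
      apply ih
      · intro p hp; exact hmem p (List.mem_cons_of_mem _ hp)
      · exact hrest
      · intro p hp
        have h1 : (jumpB pts pts.length d L : Int) ≤ (pts.length : Int) + (k : Int) := by
          exact_mod_cast hjle
        have h2 : i ≤ p.1 := hhd p hp
        rw [← hik] at h1
        omega

-- ===== VERDICT (by name: the statement is the Claim_ definition above) =====
theorem obtuse_triangle_num_spec : Claim_equal_obtuse_triangle_num := by
  intro points _
  unfold Spec_obtuse_triangle_num obtuse_triangle_num obtuse_triangle_num_alt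
  have hs : (PySem.List.sorted points (fun p => p) false).Pairwise (fun a b => a ≤ b) :=
    PySem.List.sorted_pairwise points (fun p => p)
  apply loops_eq _ hs
  · intro p hp
    obtain ⟨k, hk, hpk⟩ := enum_mem _ 0 p hp
    exact ⟨k, hk, by simpa using hpk⟩
  · exact enum_pairwise_fst _ 0
  · intro p hp
    obtain ⟨k, hk, hpk⟩ := enum_mem _ 0 p hp
    rw [hpk]
    show ((0 : Nat) : Int) ≤ _ + (0 + (k : Int))
    have : (0 : Int) ≤ (k : Int) := Int.natCast_nonneg k
    omega
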